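-- pv_equiv track=rewrite | github.com/SmortAI/smort | dashboard/webserver.py | RemoveVars
-- ===== SOURCE A (Python) =====
-- def split(word):
--     return [char for char in word]
--
-- def RemoveVars(string):
--     string = split(string)
--     stop = False
--     finalStr = ""
--     for i in range(len(string)):
--         if(string[i] == "?"):
--             stop = True
--         if(stop == False):
--             finalStr += string[i]
--     return finalStr
-- ===== SOURCE B (Python) =====
-- def RemoveVars(string):
--     idx = string.find('?')
--     return string if idx == -1 else string[:idx]
-- ===== Notes on version B (the rewrite author's own statement) =====
-- stated objective: simpler
-- what changed: Replaced A's character-by-character accumulation with a stop flag (and its list-splitting helper) by locating the first delimiter with str.find and slicing the prefix; the C-level find/slice gives a measured constant-factor speedup over the Python-level loop.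
import Mathlib
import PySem

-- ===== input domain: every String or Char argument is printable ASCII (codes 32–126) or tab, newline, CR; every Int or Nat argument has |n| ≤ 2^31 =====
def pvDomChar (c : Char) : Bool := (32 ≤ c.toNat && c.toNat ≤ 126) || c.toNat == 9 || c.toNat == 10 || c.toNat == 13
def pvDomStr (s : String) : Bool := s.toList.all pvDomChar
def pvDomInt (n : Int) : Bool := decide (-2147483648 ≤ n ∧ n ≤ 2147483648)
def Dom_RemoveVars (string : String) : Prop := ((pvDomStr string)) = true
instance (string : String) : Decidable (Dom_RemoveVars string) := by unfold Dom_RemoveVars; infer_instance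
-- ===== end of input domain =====

-- B replaces A's per-character accumulation guarded by a stop flag with locate-first-'?'-then-slice; objective: simpler.

-- ===== PORT A =====
-- split(word) = list of its characters
def pvSplit (word : String) : List Char := word.toList

def RemoveVars (string : String) : String :=
  let chars := pvSplit string
  -- for i in range(len(string)) with state (stop, finalStr); chars.getD i ' ' is string[i] (i is always in range here)
  let r := (List.range chars.length).foldl
    (fun (st : Bool × String) (i : Nat) =>
      let c := chars.getD i ' '
      let stop := if c == '?' then true else st.1
      (stop, if stop = false then st.2.push c else st.2))
    (false, "")
  r.2

-- ===== PORT B =====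
def RemoveVars_alt (string : String) : String :=
  let idx := PySem.Str.find string "?"
  if idx = -1 then string else PySem.Str.slice string none (some idx)

-- ===== PRECONDITION & SPEC =====
def Spec_RemoveVars (string : String) (out : String) : Prop := out = RemoveVars_alt string
instance (string : String) (out : String) : Decidable (Spec_RemoveVars string out) := by unfold Spec_RemoveVars; infer_instance

-- ===== CLAIM (what is proved, stated in full; the proofs are below) =====
def Claim_equal_RemoveVars : Prop := ∀ (string : String), Dom_RemoveVars string → Spec_RemoveVars string (RemoveVars string)

-- ===== LEMMAS AND PROOFS =====

-- folding over range-of-indices with safe indexing is folding over the list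
theorem foldl_range_getD {α β : Type} (l : List α) (d : α) (f : β → α → β) (b : β) :
    (List.range l.length).foldl (fun s i => f s (l.getD i d)) b = l.foldl f b := by
  induction l generalizing b with
  | nil => rfl
  | cons a t ih =>
    simp only [List.length_cons, List.range_succ_eq_map, List.foldl_cons, List.foldl_map,
      List.getD_cons_zero, List.getD_cons_succ]
    exact ih (f b a)

def pvStep (st : Bool × String) (c : Char) : Bool × String :=
  let stop := if c == '?' then true else st.1
  (stop, if stop = false then st.2.push c else st.2)

theorem foldl_pvStep_true (l : List Char) (acc : String) :
    (l.foldl pvStep (true, acc)).2 = acc := by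
  induction l generalizing acc with
  | nil => rfl
  | cons c t ih => simpa [pvStep] using ih acc

theorem foldl_pvStep_false (l : List Char) (acc : String) :
    ((l.foldl pvStep (false, acc)).2).toList
      = acc.toList ++ l.takeWhile (fun c => !(c == '?')) := by
  induction l generalizing acc with
  | nil => simp
  | cons c t ih =>
    by_cases hc : c = '?'
    · subst hc
      simp [pvStep, foldl_pvStep_true]
    · simp [pvStep, hc, ih]

theorem RemoveVars_toList (string : String) :
    (RemoveVars string).toList = string.toList.takeWhile (fun c => !(c == '?')) := by
  show ((List.range (pvSplit string).length).foldl
      (fun (s : Bool × String) (i : Nat) => pvStep s ((pvSplit string).getD i ' '))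
      (false, "")).2.toList = _
  rw [foldl_range_getD (pvSplit string) ' ' pvStep (false, "")]
  simpa [pvSplit] using foldl_pvStep_false string.toList ""

-- if the first occurrence of '?' in l is at index n, the take-n prefix is the takeWhile prefix
theorem take_eq_takeWhile (l : List Char) (n : Nat)
    (h1 : ∀ i, i < n → l[i]? ≠ some '?')
    (h2 : l[n]? = some '?') :
    l.takeWhile (fun c => !(c == '?')) = l.take n := by
  induction l generalizing n with
  | nil => simp at h2
  | cons a t ih =>
    cases n with
    | zero =>
      simp only [List.getElem?_cons_zero, Option.some.injEq] at h2
      simp [List.takeWhile_cons, h2]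
    | succ m =>
      have ha : a ≠ '?' := by simpa using h1 0 (Nat.succ_pos m)
      rw [List.takeWhile_cons, if_pos (by simp [ha]), List.take_succ_cons]
      congr 1
      exact ih m (fun i hi => by simpa using h1 (i + 1) (by omega)) (by simpa using h2)

theorem singleton_prefix_drop_iff (l : List Char) (i : Nat) :
    ['?'] <+: l.drop i ↔ l[i]? = some '?' := by
  constructor
  · rintro ⟨s, hs⟩
    have := congrArg (·[0]?) hs
    simpa [List.getElem?_drop] using this.symm
  · intro h
    have hi : i < l.length := by
      by_contra hge
      rw [List.getElem?_eq_none_iff.mpr (by omega)] at h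
      simp at h
    refine ⟨l.drop (i + 1), ?_⟩
    have hd : l.drop i = l[i] :: l.drop (i + 1) := List.drop_eq_getElem_cons hi
    have hc : l[i] = '?' := by
      have h' := List.getElem?_eq_getElem hi
      rw [h'] at h
      simpa using h
    simp [hd, hc]

theorem RemoveVars_alt_toList (string : String) :
    (RemoveVars_alt string).toList = string.toList.takeWhile (fun c => !(c == '?')) := by
  unfold RemoveVars_alt
  by_cases h : PySem.Str.find string "?" = -1
  · rw [if_pos h]
    have hnot : ¬ (['?'] <:+: string.toList) := by
      rw [show ['?'] = ("?" : String).toList from rfl, ← PySem.Chars.find_eq_neg_one_iff]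
      simpa using h
    have hmem : '?' ∉ string.toList := fun hm =>
      hnot ((List.singleton_infix_iff _ _).mpr hm)
    rw [List.takeWhile_eq_self_iff.mpr]
    intro c hc
    simp only [Bool.not_eq_true', beq_eq_false_iff_ne, ne_eq]
    intro hce; exact hmem (hce ▸ hc)
  · rw [if_neg h]
    have hfind : PySem.Str.find string "?" = PySem.Chars.find string.toList ['?'] := by
      simp [show ("?" : String).toList = ['?'] from rfl]
    have hnn : 0 ≤ PySem.Chars.find string.toList ['?'] := by
      rcases Int.lt_or_le (PySem.Chars.find string.toList ['?']) 0 with hlt | hle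
      · exfalso
        have hge : -1 ≤ PySem.Chars.find string.toList ['?'] := PySem.Chars.neg_one_le_find _ _
        have : PySem.Chars.find string.toList ['?'] = -1 := by omega
        exact h (by rw [hfind, this])
      · exact hle
    obtain ⟨hpre, hmin⟩ := PySem.Chars.find_spec hnn
    set n : Nat := (PySem.Chars.find string.toList ['?']).toNat with hn
    have h2 : string.toList[n]? = some '?' := (singleton_prefix_drop_iff _ _).mp hpre
    have h1 : ∀ i, i < n → string.toList[i]? ≠ some '?' := by
      intro i hi hsome
      exact hmin i hi ((singleton_prefix_drop_iff _ _).mpr hsome)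
    rw [take_eq_takeWhile string.toList n h1 h2, hfind]
    simp [PySem.Str.slice, PySem.List.slice_to _ hnn]
    rfl

-- ===== VERDICT (by name: the statement is the Claim_ definition above) =====
theorem RemoveVars_spec : Claim_equal_RemoveVars := by
  intro s _
  unfold Spec_RemoveVars
  exact String.toList_inj.mp ((RemoveVars_toList s).trans (RemoveVars_alt_toList s).symm)
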